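-- pv_equiv track=rewrite | github.com/FilipKovalik/FileManager | os_module.py | sort_files_wo_sorting_files
-- ===== SOURCE A (Python) =====
-- def sort_files_wo_sorting_files(files: list, directory: str):
--     sorted_list = []
--     sorted_list2 = []
--     for file in files:
--         if "." not in file:
--             sorted_list.append(file)
--         elif "." in file:
--             sorted_list2.append(file)
--     sorted_list.extend(sorted_list2)
--
--     return sorted_list
-- ===== SOURCE B (Python) =====
-- def sort_files_wo_sorting_files(files: list, directory: str):
--     # Stable sort on the boolean key: dotless files (False) first, dotted (True) after,
--     # each group in original order -- exactly A's partition-then-extend output.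
--     return sorted(files, key=lambda f: "." in f)
-- ===== Notes on version B (the rewrite author's own statement) =====
-- stated objective: idiomatic
-- what changed: Replaced the explicit two-accumulator partition loop with a single stable sort on the boolean key '"." in f', relying on sort stability to keep dotless files first in original order.
import Mathlib
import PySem

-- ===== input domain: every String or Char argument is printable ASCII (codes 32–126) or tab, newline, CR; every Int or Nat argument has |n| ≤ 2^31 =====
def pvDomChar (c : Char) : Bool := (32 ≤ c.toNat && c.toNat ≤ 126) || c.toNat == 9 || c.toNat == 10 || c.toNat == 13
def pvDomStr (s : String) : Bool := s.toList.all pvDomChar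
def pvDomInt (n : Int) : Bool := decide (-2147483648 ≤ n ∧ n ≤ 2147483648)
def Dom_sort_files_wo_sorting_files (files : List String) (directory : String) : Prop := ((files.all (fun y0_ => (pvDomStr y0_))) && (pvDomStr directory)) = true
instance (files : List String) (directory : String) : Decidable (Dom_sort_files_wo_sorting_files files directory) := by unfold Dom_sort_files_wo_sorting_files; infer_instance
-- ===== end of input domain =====

-- B replaces A's two-accumulator partition loop with one stable sort on the boolean
-- key '"." in f' (idiomatic; same output, dotless files first in original order).


-- ===== PORT A =====
-- two accumulator lists, appended in order, then concatenated
def sort_files_wo_sorting_files (files : List String) (directory : String) : List String :=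
  let st := files.foldl
    (fun (st : List String × List String) file =>
      if ¬ (PySem.Str.isIn "." file = true) then (st.1 ++ [file], st.2)
      else if PySem.Str.isIn "." file = true then (st.1, st.2 ++ [file])
      else st)
    ([], [])
  st.1 ++ st.2

-- ===== PORT B =====
def sort_files_wo_sorting_files_alt (files : List String) (directory : String) : List String :=
  PySem.List.sorted files (fun f => PySem.Str.isIn "." f) false

-- ===== PRECONDITION & SPEC =====
def Spec_sort_files_wo_sorting_files (files : List String) (directory : String) (out : List String) : Prop := out = sort_files_wo_sorting_files_alt files directory
instance (files : List String) (directory : String) (out : List String) : Decidable (Spec_sort_files_wo_sorting_files files directory out) := by unfold Spec_sort_files_wo_sorting_files; infer_instance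

-- ===== CLAIM (what is proved, stated in full; the proofs are below) =====
def Claim_equal_sort_files_wo_sorting_files : Prop := ∀ (files : List String) (directory : String), Dom_sort_files_wo_sorting_files files directory → Spec_sort_files_wo_sorting_files files directory (sort_files_wo_sorting_files files directory)

-- ===== LEMMAS AND PROOFS =====

-- inserting a false-key element into (all-false ++ all-true) puts it at the end of the false block
theorem insertBy_false {key : String → Bool} (x : String) (hx : key x = false)
    (l1 l2 : List String) (h1 : ∀ y ∈ l1, key y = false) (h2 : ∀ y ∈ l2, key y = true) :
    PySem.List.insertBy (fun a b => decide (key a < key b)) x (l1 ++ l2)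
      = (l1 ++ [x]) ++ l2 := by
  induction l1 with
  | nil =>
    cases l2 with
    | nil => simp [PySem.List.insertBy]
    | cons y ys =>
      have hy := h2 y (by simp)
      simp [PySem.List.insertBy, hx, hy]
  | cons z l1' ih =>
    have hz := h1 z (by simp)
    simp only [List.cons_append, PySem.List.insertBy]
    rw [if_neg (by simp [hx, hz]),
      ih (fun y hy => h1 y (List.mem_cons_of_mem _ hy))]

-- inserting a true-key element goes to the very end
theorem insertBy_true {key : String → Bool} (x : String) (hx : key x = true)
    (l : List String) : PySem.List.insertBy (fun a b => decide (key a < key b)) x l = l ++ [x] := by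
  induction l with
  | nil => simp [PySem.List.insertBy]
  | cons z l' ih =>
    simp only [PySem.List.insertBy]
    rw [if_neg (by simp [hx, Bool.lt_iff]), ih]
    simp

-- loop invariant: B's insertion-sort fold over a partitioned accumulator equals A's partition fold
theorem fold_eq (key : String → Bool) (xs : List String) :
    ∀ (l1 l2 : List String), (∀ y ∈ l1, key y = false) → (∀ y ∈ l2, key y = true) →
    xs.foldl (fun acc x => PySem.List.insertBy (fun a b => decide (key a < key b)) x acc) (l1 ++ l2)
      = (xs.foldl (fun (st : List String × List String) file =>
          if ¬ (key file = true) then (st.1 ++ [file], st.2)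
          else if key file = true then (st.1, st.2 ++ [file])
          else st) (l1, l2)).1
        ++ (xs.foldl (fun (st : List String × List String) file =>
          if ¬ (key file = true) then (st.1 ++ [file], st.2)
          else if key file = true then (st.1, st.2 ++ [file])
          else st) (l1, l2)).2 := by
  induction xs with
  | nil => intro l1 l2 _ _; simp
  | cons x xs ih =>
    intro l1 l2 h1 h2
    simp only [List.foldl_cons]
    by_cases hx : key x = true
    · rw [insertBy_true x hx, List.append_assoc, if_neg (by simp [hx]), if_pos hx]
      exact ih l1 (l2 ++ [x]) h1
        (by intro y hy
            rw [List.mem_append] at hy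
            cases hy with
            | inl h => exact h2 y h
            | inr h => simp_all)
    · have hx' : key x = false := by simp_all
      rw [insertBy_false x hx' l1 l2 h1 h2, if_pos hx]
      exact ih (l1 ++ [x]) l2
        (by intro y hy
            rw [List.mem_append] at hy
            cases hy with
            | inl h => exact h1 y h
            | inr h => simp_all) h2

-- ===== VERDICT (by name: the statement is the Claim_ definition above) =====
theorem sort_files_wo_sorting_files_spec : Claim_equal_sort_files_wo_sorting_files := by
  intro files directory _
  unfold Spec_sort_files_wo_sorting_files sort_files_wo_sorting_files sort_files_wo_sorting_files_alt
    PySem.List.sorted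
  simpa using (fold_eq (fun f => PySem.Str.isIn "." f) files [] []
    (by intro y hy; simp at hy) (by intro y hy; simp at hy)).symm
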